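-- pv_equiv track=rewrite | github.com/soheeeeP/auto-work-scheduler-generator | scheduler.py | find_table_idx_to_assign
-- ===== SOURCE A (Python) =====
-- def find_table_idx_to_assign(table, term_count, worker_per_term, start_i):
--     r, c = start_i // term_count, start_i % term_count
--     for j in range(c, term_count):
--         if len(table[r][j].keys()) < worker_per_term:
--             return r * term_count + j
--
--     for i in range(r + 1, len(table)):
--         for j in range(0, term_count):
--             if len(table[i][j].keys()) < worker_per_term:
--                 return i * term_count + j
--
--     return -1
-- ===== SOURCE B (Python) =====
-- def find_table_idx_to_assign(table, term_count, worker_per_term, start_i):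
--     # Precompute the flat indices of all cells with free capacity (in order),
--     # then return the first one at or after start_i.
--     free_slots = [i * term_count + j
--                   for i, row in enumerate(table)
--                   for j in range(min(term_count, len(row)))
--                   if len(row[j].keys()) < worker_per_term]
--     for idx in free_slots:
--         if idx >= start_i:
--             return idx
--     return -1
-- ===== Notes on version B (the rewrite author's own statement) =====
-- stated objective: alternative
-- what changed: Instead of A's two-phase early-exit scan (tail of the start row, then nested loops over the remaining rows), B first materialises the ordered list of flat indices of ALL cells with free capacity via a single enumerate-comprehension and then returns the first candidate >= start_i.
-- intended difference: For a negative start_i (term_count >= 1, within Python's wrap range) whose wrapped-around scan region contains a free cell, A returns a meaningless NEGATIVE flat index produced by negative-index wraparound (it can even collide with the -1 'no slot' sentinel), while B returns the flat index of the first genuinely free cell, which is the intended value. — e.g. on find_table_idx_to_assign([[[("a", 1)]]], 1, 2, -1): A returns -1, B returns 0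
import Mathlib
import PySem

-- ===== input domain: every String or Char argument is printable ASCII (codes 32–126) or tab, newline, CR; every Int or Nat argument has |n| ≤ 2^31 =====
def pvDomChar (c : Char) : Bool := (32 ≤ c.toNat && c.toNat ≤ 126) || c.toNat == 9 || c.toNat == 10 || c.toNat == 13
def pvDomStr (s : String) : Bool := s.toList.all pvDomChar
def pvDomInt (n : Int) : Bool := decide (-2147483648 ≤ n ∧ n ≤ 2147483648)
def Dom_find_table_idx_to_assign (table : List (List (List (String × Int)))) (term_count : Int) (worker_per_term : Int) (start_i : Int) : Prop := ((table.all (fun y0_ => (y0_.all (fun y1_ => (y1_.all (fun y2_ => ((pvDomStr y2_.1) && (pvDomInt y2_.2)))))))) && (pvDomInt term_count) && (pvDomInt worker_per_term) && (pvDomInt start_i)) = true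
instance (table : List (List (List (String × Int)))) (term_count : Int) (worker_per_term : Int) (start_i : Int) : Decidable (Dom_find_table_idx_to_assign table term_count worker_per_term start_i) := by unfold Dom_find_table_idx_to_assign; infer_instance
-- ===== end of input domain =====

-- ===== PORT A =====
-- B precomputes the ordered list of ALL free cells' flat indices and returns the first one
-- at or after start_i (alternative algorithm, same asymptotic cost, no early-exit scan).
-- On a negative start_i A wraps around via Python negative indexing; where that wrapped scan
-- region holds a free cell A returns a meaningless NEGATIVE index while B returns the first
-- genuinely free cell — stated below as the intended difference D_.

-- row lookup table[i] and cell length len(table[i][j].keys()): a Python dict's keys are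
-- distinct, so len(d.keys()) is the length of the association list.  pyGetD's [] default is
-- only reached where the Python raises IndexError, which Pre_ excludes.
def pvRow (table : List (List (List (String × Int)))) (i : Int) : List (List (String × Int)) :=
  PySem.List.pyGetD table i []

def pvCellLen (w : List (List (String × Int))) (j : Int) : Int :=
  (((PySem.List.pyGetD w j []).length : Int))

-- A's inner 'for j in range(a, term_count): if free: return j' loop, as an early-exit
-- recursion on j with fuel term_count - a (the fuel only makes the loop total; it equals
-- the loop's own trip count, see pvScan_eq below)
def pvFindFreeFuel (w : List (List (String × Int))) (wpt : Int) : Int → Nat → Option Int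
  | _, 0 => none
  | j, Nat.succ f => if pvCellLen w j < wpt then some j else pvFindFreeFuel w wpt (j + 1) f

def pvScan (w : List (List (String × Int))) (tc wpt a : Int) : Option Int :=
  pvFindFreeFuel w wpt a (tc - a).toNat

-- ===== PORT A =====
def find_table_idx_to_assign (table : List (List (List (String × Int)))) (term_count : Int) (worker_per_term : Int) (start_i : Int) : Int :=
  -- r, c = start_i // term_count, start_i % term_count (inlined);
  -- first for-loop with early return, then the nested loops over the remaining rows
  match pvScan (pvRow table (PySem.Int.floordiv start_i term_count)) term_count worker_per_term
      (PySem.Int.mod start_i term_count) with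
  | some j => PySem.Int.floordiv start_i term_count * term_count + j
  | none =>
    match (PySem.List.pyRange (PySem.Int.floordiv start_i term_count + 1) (table.length : Int) 1).findSome?
        (fun i => (pvScan (pvRow table i) term_count worker_per_term 0).map
          (fun j => i * term_count + j)) with
    | some v => v
    | none => -1

-- ===== PORT B =====
def find_table_idx_to_assign_alt (table : List (List (List (String × Int)))) (term_count : Int) (worker_per_term : Int) (start_i : Int) : Int :=
  -- free_slots = [i*term_count+j for i,row in enumerate(table) for j in range(min(term_count,len(row))) if len(row[j].keys()) < worker_per_term]
  let free_slots := (PySem.List.enumerate table).flatMap (fun p =>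
    ((PySem.List.pyRange 0 (min term_count ((p.2.length : Int))) 1).filter
        (fun j => decide (pvCellLen p.2 j < worker_per_term))).map (fun j => p.1 * term_count + j))
  -- for idx in free_slots: if idx >= start_i: return idx;  return -1
  match free_slots.find? (fun idx => decide (start_i ≤ idx)) with
  | some idx => idx
  | none => -1

-- ===== PRECONDITION & SPEC =====
-- the scanned tail of a row holds a free EXISTING cell (so the scan returns before walking
-- off the row), resp. is safe to scan (full width, or such a free cell)
def pvSegFree (w : List (List (String × Int))) (tc wpt a : Int) : Bool :=
  (PySem.List.enumerate w).any (fun q =>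
    decide (a ≤ q.1) && decide (q.1 < tc) && decide ((q.2.length : Int) < wpt))

def pvSegOk (w : List (List (String × Int))) (tc wpt a : Int) : Bool :=
  decide (tc ≤ (w.length : Int)) || pvSegFree w tc wpt a

-- Pre_ is exactly the set of inputs on which the Python A returns (checked by fuzzing):
-- term_count ≤ -1 makes every loop range empty (A returns -1 touching nothing);
-- term_count = 0 is a ZeroDivisionError; for term_count ≥ 1, start_i must put row
-- r = start_i//term_count in Python's indexable range [-len, len), the scanned tail of that
-- row must be safe, and each later row reached by the scan (i.e. no earlier scanned segment
-- held a free cell) must be safe — elsewhere A raises IndexError mid-scan.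
def Pre_find_table_idx_to_assign (table : List (List (List (String × Int)))) (term_count : Int) (worker_per_term : Int) (start_i : Int) : Prop :=
  term_count ≤ -1 ∨
  (1 ≤ term_count ∧
   -((table.length : Int) * term_count) ≤ start_i ∧
   start_i < (table.length : Int) * term_count ∧
   pvSegOk (pvRow table (PySem.Int.floordiv start_i term_count)) term_count worker_per_term (PySem.Int.mod start_i term_count) = true ∧
   ∀ i ∈ PySem.List.pyRange (PySem.Int.floordiv start_i term_count + 1) (table.length : Int) 1,
     (pvSegFree (pvRow table (PySem.Int.floordiv start_i term_count)) term_count worker_per_term (PySem.Int.mod start_i term_count) = false ∧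
      ∀ k ∈ PySem.List.pyRange (PySem.Int.floordiv start_i term_count + 1) i 1, pvSegFree (pvRow table k) term_count worker_per_term 0 = false) →
     pvSegOk (pvRow table i) term_count worker_per_term 0 = true)
instance (table : List (List (List (String × Int)))) (term_count : Int) (worker_per_term : Int) (start_i : Int) : Decidable (Pre_find_table_idx_to_assign table term_count worker_per_term start_i) := by unfold Pre_find_table_idx_to_assign; infer_instance

def pvWitness_find_table_idx_to_assign : (List (List (List (String × Int)))) × Int × Int × Int :=
  ([[[("a", 1)], []], [[("b", 2)], [("c", 3)]]], 2, 1, 1)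

-- On a negative start_i (term_count ≥ 1, in Python's wrap range) whose wrapped-around scan
-- region contains a free cell, A returns a meaningless NEGATIVE flat index (built from the
-- negative row number, it can even collide with the -1 sentinel), while B returns the flat
-- index of the first genuinely free cell, the intended value.
def D_find_table_idx_to_assign (table : List (List (List (String × Int)))) (term_count : Int) (worker_per_term : Int) (start_i : Int) : Prop :=
  1 ≤ term_count ∧ -((table.length : Int) * term_count) ≤ start_i ∧ start_i < 0 ∧
  ∃ p ∈ PySem.List.enumerate table, ∃ q ∈ PySem.List.enumerate p.2,
    start_i + (table.length : Int) * term_count ≤ p.1 * term_count + q.1 ∧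
    q.1 < term_count ∧ (q.2.length : Int) < worker_per_term
instance (table : List (List (List (String × Int)))) (term_count : Int) (worker_per_term : Int) (start_i : Int) : Decidable (D_find_table_idx_to_assign table term_count worker_per_term start_i) := by unfold D_find_table_idx_to_assign; infer_instance

def Spec_find_table_idx_to_assign (table : List (List (List (String × Int)))) (term_count : Int) (worker_per_term : Int) (start_i : Int) (out : Int) : Prop := ¬ D_find_table_idx_to_assign table term_count worker_per_term start_i → out = find_table_idx_to_assign_alt table term_count worker_per_term start_i
instance (table : List (List (List (String × Int)))) (term_count : Int) (worker_per_term : Int) (start_i : Int) (out : Int) : Decidable (Spec_find_table_idx_to_assign table term_count worker_per_term start_i out) := by unfold Spec_find_table_idx_to_assign; infer_instance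

def pvDiffWitness_find_table_idx_to_assign : (List (List (List (String × Int)))) × Int × Int × Int :=
  ([[[("a", 1)]]], 1, 2, -1)

def pvDiffWitnessOut_find_table_idx_to_assign : Int × Int := (-1, 0)

-- ===== CLAIM (what is proved, stated in full; the proofs are below) =====
def Claim_unchanged_find_table_idx_to_assign : Prop := ∀ (table : List (List (List (String × Int)))) (term_count : Int) (worker_per_term : Int) (start_i : Int), Dom_find_table_idx_to_assign table term_count worker_per_term start_i → Pre_find_table_idx_to_assign table term_count worker_per_term start_i → Spec_find_table_idx_to_assign table term_count worker_per_term start_i (find_table_idx_to_assign table term_count worker_per_term start_i)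
def Claim_changed_find_table_idx_to_assign : Prop := Dom_find_table_idx_to_assign (pvDiffWitness_find_table_idx_to_assign.1) (pvDiffWitness_find_table_idx_to_assign.2.1) (pvDiffWitness_find_table_idx_to_assign.2.2.1) (pvDiffWitness_find_table_idx_to_assign.2.2.2) ∧ Pre_find_table_idx_to_assign (pvDiffWitness_find_table_idx_to_assign.1) (pvDiffWitness_find_table_idx_to_assign.2.1) (pvDiffWitness_find_table_idx_to_assign.2.2.1) (pvDiffWitness_find_table_idx_to_assign.2.2.2) ∧ D_find_table_idx_to_assign (pvDiffWitness_find_table_idx_to_assign.1) (pvDiffWitness_find_table_idx_to_assign.2.1) (pvDiffWitness_find_table_idx_to_assign.2.2.1) (pvDiffWitness_find_table_idx_to_assign.2.2.2) ∧ find_table_idx_to_assign (pvDiffWitness_find_table_idx_to_assign.1) (pvDiffWitness_find_table_idx_to_assign.2.1) (pvDiffWitness_find_table_idx_to_assign.2.2.1) (pvDiffWitness_find_table_idx_to_assign.2.2.2) = pvDiffWitnessOut_find_table_idx_to_assign.1 ∧ find_table_idx_to_assign_alt (pvDiffWitness_find_table_idx_to_assign.1) (pvDiffWitness_find_table_idx_to_assign.2.1)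 (pvDiffWitness_find_table_idx_to_assign.2.2.1) (pvDiffWitness_find_table_idx_to_assign.2.2.2) = pvDiffWitnessOut_find_table_idx_to_assign.2 ∧ pvDiffWitnessOut_find_table_idx_to_assign.1 ≠ pvDiffWitnessOut_find_table_idx_to_assign.2
def Claim_exact_find_table_idx_to_assign : Prop := ∀ (table : List (List (List (String × Int)))) (term_count : Int) (worker_per_term : Int) (start_i : Int), Dom_find_table_idx_to_assign table term_count worker_per_term start_i → Pre_find_table_idx_to_assign table term_count worker_per_term start_i → D_find_table_idx_to_assign table term_count worker_per_term start_i → find_table_idx_to_assign table term_count worker_per_term start_i ≠ find_table_idx_to_assign_alt table term_count worker_per_term start_i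

-- ===== LEMMAS AND PROOFS =====

-- B's candidate list restricted to the rows from m on (B's free_slots is pvSlots … 0)
def pvSlots (table : List (List (List (String × Int)))) (tc wpt m : Int) : List Int :=
  (PySem.List.pyRange m (table.length : Int) 1).flatMap (fun i =>
    ((PySem.List.pyRange 0 (min tc ((pvRow table i).length : Int)) 1).filter
        (fun j => decide (pvCellLen (pvRow table i) j < wpt))).map (fun j => i * tc + j))

theorem pvSlots_eq (table : List (List (List (String × Int)))) (tc wpt : Int) :
    (PySem.List.enumerate table).flatMap (fun p =>
      ((PySem.List.pyRange 0 (min tc ((p.2.length : Int))) 1).filter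
          (fun j => decide (pvCellLen p.2 j < wpt))).map (fun j => p.1 * tc + j))
    = pvSlots table tc wpt 0 := by
  rw [PySem.List.enumerate_eq_map_pyRange (xs := table) (d := ([] : List (List (String × Int)))),
      List.flatMap_map]
  simp only [pvSlots, pvRow, PySem.List.len_eq]
  rfl

-- B's port with its local list named away (zeta-reduced form used by the proofs)
theorem pvAlt_eq (table : List (List (List (String × Int)))) (tc wpt si : Int) :
    find_table_idx_to_assign_alt table tc wpt si
    = match (pvSlots table tc wpt 0).find? (fun idx => decide (si ≤ idx)) with
      | some idx => idx
      | none => -1 := by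
  unfold find_table_idx_to_assign_alt
  rw [pvSlots_eq]

theorem pvMem_slots (table : List (List (List (String × Int)))) (tc wpt m x : Int) :
    x ∈ pvSlots table tc wpt m ↔
    ∃ i j : Int, m ≤ i ∧ i < (table.length : Int) ∧ 0 ≤ j ∧
      j < min tc ((pvRow table i).length : Int) ∧
      pvCellLen (pvRow table i) j < wpt ∧ x = i * tc + j := by
  unfold pvSlots
  simp only [List.mem_flatMap, List.mem_map, List.mem_filter,
    PySem.List.mem_pyRange_one, decide_eq_true_eq]
  constructor
  · rintro ⟨i, ⟨him, hin⟩, j, ⟨⟨hj0, hjm⟩, hp⟩, rfl⟩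
    exact ⟨i, j, him, hin, hj0, hjm, hp, rfl⟩
  · rintro ⟨i, j, him, hin, hj0, hjm, hp, rfl⟩
    exact ⟨i, ⟨him, hin⟩, j, ⟨⟨hj0, hjm⟩, hp⟩, rfl⟩

theorem pvSegFree_iff (w : List (List (String × Int))) (tc wpt a : Int) (ha : 0 ≤ a) :
    pvSegFree w tc wpt a = true ↔
    ∃ j : Int, a ≤ j ∧ j < min tc ((w.length : Int)) ∧ pvCellLen w j < wpt := by
  unfold pvSegFree
  rw [PySem.List.enumerate_eq_map_pyRange (xs := w) (d := ([] : List (String × Int)))]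
  simp only [List.any_eq_true, List.mem_map, PySem.List.mem_pyRange_one, PySem.List.len_eq,
    Bool.and_eq_true, decide_eq_true_eq]
  constructor
  · rintro ⟨x, ⟨j, ⟨hj0, hjl⟩, rfl⟩, ⟨hj1, hj2⟩, hj3⟩
    exact ⟨j, hj1, by omega, hj3⟩
  · rintro ⟨j, hja, hjm, hp⟩
    exact ⟨(j, PySem.List.pyGetD w j []), ⟨j, ⟨by omega, by omega⟩, rfl⟩, ⟨hja, by omega⟩, hp⟩

-- the fuel recursion IS the find? over range(a, tc)
theorem pvScan_eq (w : List (List (String × Int))) (tc wpt a : Int) :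
    pvScan w tc wpt a
    = (PySem.List.pyRange a tc 1).find? (fun j => decide (pvCellLen w j < wpt)) := by
  unfold pvScan
  suffices h : ∀ (f : Nat) (a : Int), f = (tc - a).toNat →
      pvFindFreeFuel w wpt a f
      = (PySem.List.pyRange a tc 1).find? (fun j => decide (pvCellLen w j < wpt)) from
    h _ a rfl
  intro f
  induction f with
  | zero =>
    intro a hf
    rw [PySem.List.pyRange_one_eq_nil (by omega)]
    rfl
  | succ f ih =>
    intro a hf
    have hatc : a < tc := by omega
    rw [PySem.List.pyRange_one_cons hatc, List.find?_cons]
    show (if pvCellLen w a < wpt then some a else pvFindFreeFuel w wpt (a + 1) f) = _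
    by_cases hp : pvCellLen w a < wpt
    · simp [hp]
    · simp [hp, ih (a + 1) (by omega)]

theorem pvFind?_ge_eq_head? (l : List Int) (a : Int) (h : ∀ x ∈ l, a ≤ x) :
    l.find? (fun x => decide (a ≤ x)) = l.head? := by
  cases l with
  | nil => rfl
  | cons x t =>
    rw [List.find?_cons_of_pos (by simpa using h x List.mem_cons_self)]
    rfl

theorem pvSegOk_or (w : List (List (String × Int))) (tc wpt a : Int)
    (hok : pvSegOk w tc wpt a = true) :
    tc ≤ (w.length : Int) ∨ pvSegFree w tc wpt a = true := by
  unfold pvSegOk at hok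
  simp only [Bool.or_eq_true, decide_eq_true_eq] at hok
  exact hok

-- a safe segment with no free cell is full width and its scan finds nothing
theorem pvSegNone (w : List (List (String × Int))) (tc wpt a : Int) (ha : 0 ≤ a)
    (hok : pvSegOk w tc wpt a = true) (hf : pvSegFree w tc wpt a = false) :
    (PySem.List.pyRange a tc 1).find? (fun j => decide (pvCellLen w j < wpt)) = none := by
  have hL : tc ≤ (w.length : Int) := by
    rcases pvSegOk_or w tc wpt a hok with h | h
    · exact h
    · rw [hf] at h; simp at h
  apply List.find?_eq_none.mpr
  intro j hj
  obtain ⟨hja, hjtc⟩ := PySem.List.mem_pyRange_one.mp hj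
  simp only [decide_eq_true_eq]
  by_contra hp
  have : pvSegFree w tc wpt a = true :=
    (pvSegFree_iff w tc wpt a ha).mpr ⟨j, hja, by omega, by simpa using hp⟩
  rw [hf] at this; simp at this

theorem pvFilterNil (w : List (List (String × Int))) (tc wpt : Int)
    (hok : pvSegOk w tc wpt 0 = true) (hf : pvSegFree w tc wpt 0 = false) :
    (PySem.List.pyRange 0 (min tc ((w.length : Int))) 1).filter
      (fun j => decide (pvCellLen w j < wpt)) = [] := by
  have hL : tc ≤ (w.length : Int) := by
    rcases pvSegOk_or w tc wpt 0 hok with h | h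
    · exact h
    · rw [hf] at h; simp at h
  rw [min_eq_left hL]
  apply List.filter_eq_nil_iff.mpr
  intro j hj
  obtain ⟨hja, hjtc⟩ := PySem.List.mem_pyRange_one.mp hj
  simp only [decide_eq_true_eq]
  by_contra hp
  have : pvSegFree w tc wpt 0 = true :=
    (pvSegFree_iff w tc wpt 0 le_rfl).mpr ⟨j, hja, by omega, by simpa using hp⟩
  rw [hf] at this; simp at this

-- one row: A's early-exit scan of the tail [a, tc) equals the first filtered free column ≥ a
theorem pvSegEq (w : List (List (String × Int))) (tc wpt a : Int)
    (htc : 1 ≤ tc) (ha : 0 ≤ a) (hatc : a < tc) (hok : pvSegOk w tc wpt a = true) :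
    (PySem.List.pyRange a tc 1).find? (fun j => decide (pvCellLen w j < wpt))
    = ((PySem.List.pyRange 0 (min tc ((w.length : Int))) 1).filter
        (fun j => decide (pvCellLen w j < wpt))).find? (fun j => decide (a ≤ j)) := by
  have hok' := pvSegOk_or w tc wpt a hok
  have ham : a < min tc (w.length : Int) := by
    rcases hok' with h | h
    · omega
    · obtain ⟨j, hja, hjm, _⟩ := (pvSegFree_iff w tc wpt a ha).mp h
      omega
  rw [PySem.List.pyRange_one_append 0 a (min tc (w.length : Int)) ha (le_of_lt ham),
      List.filter_append, List.find?_append]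
  have h1 : ((PySem.List.pyRange 0 a 1).filter (fun j => decide (pvCellLen w j < wpt))).find?
      (fun j => decide (a ≤ j)) = none := by
    apply List.find?_eq_none.mpr
    intro x hx
    have hmem := PySem.List.mem_pyRange_one.mp (List.mem_filter.mp hx).1
    simp only [decide_eq_true_eq]
    by_contra hc
    have : a ≤ x := by simpa using hc
    omega
  have h2 : ∀ x ∈ (PySem.List.pyRange a (min tc (w.length : Int)) 1).filter
      (fun j => decide (pvCellLen w j < wpt)), a ≤ x := by
    intro x hx
    exact (PySem.List.mem_pyRange_one.mp (List.mem_filter.mp hx).1).1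
  rw [h1, Option.none_or, pvFind?_ge_eq_head? _ a h2, List.head?_filter]
  by_cases hL : tc ≤ (w.length : Int)
  · rw [min_eq_left hL]
  · have hfree : pvSegFree w tc wpt a = true := hok'.resolve_left hL
    obtain ⟨j, hja, hjm, hp⟩ := (pvSegFree_iff w tc wpt a ha).mp hfree
    rw [PySem.List.pyRange_one_append a (min tc (w.length : Int)) tc (le_of_lt ham) (by omega),
        List.find?_append]
    have hsome : ((PySem.List.pyRange a (min tc (w.length : Int)) 1).find?
        (fun j => decide (pvCellLen w j < wpt))).isSome := by
      apply List.find?_isSome.mpr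
      exact ⟨j, PySem.List.mem_pyRange_one.mpr ⟨hja, by omega⟩, by simpa using hp⟩
    obtain ⟨v, hv⟩ := Option.isSome_iff_exists.mp hsome
    rw [hv, Option.some_or]

-- split B's candidate list at a row boundary
theorem pvSlots_split (table : List (List (List (String × Int)))) (tc wpt m k : Int)
    (h1 : m ≤ k) (h2 : k ≤ (table.length : Int)) :
    pvSlots table tc wpt m
    = (PySem.List.pyRange m k 1).flatMap (fun i =>
        ((PySem.List.pyRange 0 (min tc ((pvRow table i).length : Int)) 1).filter
            (fun j => decide (pvCellLen (pvRow table i) j < wpt))).map (fun j => i * tc + j))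
      ++ pvSlots table tc wpt k := by
  unfold pvSlots
  rw [PySem.List.pyRange_one_append m k _ h1 h2, List.flatMap_append]

-- the rows from m on: A's nested early-exit scan equals the first candidate ≥ start_i
theorem pvRowsEq (table : List (List (List (String × Int)))) (tc wpt si m : Int)
    (htc : 1 ≤ tc) (hm : si ≤ m * tc)
    (hch : ∀ i : Int, m ≤ i → i < (table.length : Int) →
      (∀ k : Int, m ≤ k → k < i → pvSegFree (pvRow table k) tc wpt 0 = false) →
      pvSegOk (pvRow table i) tc wpt 0 = true) :
    (PySem.List.pyRange m (table.length : Int) 1).findSome? (fun i =>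
        ((PySem.List.pyRange 0 tc 1).find? (fun j => decide (pvCellLen (pvRow table i) j < wpt))).map
          (fun j => i * tc + j))
    = (pvSlots table tc wpt m).find? (fun idx => decide (si ≤ idx)) := by
  by_cases hmn : (table.length : Int) ≤ m
  · rw [PySem.List.pyRange_one_eq_nil hmn]
    unfold pvSlots
    rw [PySem.List.pyRange_one_eq_nil hmn]
    rfl
  · replace hmn : m < (table.length : Int) := by omega
    have hok := hch m le_rfl hmn (fun k hk1 hk2 => absurd hk2 (by omega))
    have hslots := pvSlots_split table tc wpt m (m + 1) (by omega) (by omega)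
    have hsing : PySem.List.pyRange m (m + 1) 1 = [m] := PySem.List.pyRange_one_singleton m
    rw [hsing, List.flatMap_cons, List.flatMap_nil, List.append_nil] at hslots
    by_cases hf : pvSegFree (pvRow table m) tc wpt 0 = true
    · -- this row holds a free cell: both sides stop here with the same column
      have hseg := pvSegEq (pvRow table m) tc wpt 0 htc le_rfl (by omega) hok
      obtain ⟨j0, hj0a, hj0m, hp0⟩ := (pvSegFree_iff (pvRow table m) tc wpt 0 le_rfl).mp hf
      have hsome : ((PySem.List.pyRange 0 tc 1).find?
          (fun j => decide (pvCellLen (pvRow table m) j < wpt))).isSome := by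
        apply List.find?_isSome.mpr
        exact ⟨j0, PySem.List.mem_pyRange_one.mpr ⟨hj0a, by omega⟩, by simpa using hp0⟩
      obtain ⟨v, hv⟩ := Option.isSome_iff_exists.mp hsome
      set F := (PySem.List.pyRange 0 (min tc ((pvRow table m).length : Int)) 1).filter
          (fun j => decide (pvCellLen (pvRow table m) j < wpt)) with hFdef
      have hFge : ∀ x ∈ F, (0 : Int) ≤ x := by
        intro x hx
        exact (PySem.List.mem_pyRange_one.mp (List.mem_filter.mp hx).1).1
      have hvF : F.head? = some v := by
        rw [← pvFind?_ge_eq_head? F 0 hFge, ← hseg, hv]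
      rw [PySem.List.pyRange_one_cons hmn]
      simp only [List.findSome?_cons]
      rw [hv, hslots]
      cases hFc : F with
      | nil => rw [hFc] at hvF; simp at hvF
      | cons y t =>
        rw [hFc] at hvF
        have hy : y = v := by simpa using hvF
        subst hy
        have hv0 : (0 : Int) ≤ y := hFge y (by rw [hFc]; exact List.mem_cons_self)
        simp only [List.map_cons, List.cons_append, List.find?_cons, Option.map_some]
        have hdec : decide (si ≤ m * tc + y) = true := by
          simp only [decide_eq_true_eq]; linarith
        rw [hdec]
    · -- no free cell in this full-width row: skip it on both sides
      have hf' : pvSegFree (pvRow table m) tc wpt 0 = false := by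
        cases hb : pvSegFree (pvRow table m) tc wpt 0
        · rfl
        · exact absurd hb hf
      have hnone := pvSegNone (pvRow table m) tc wpt 0 le_rfl hok hf'
      have hfil := pvFilterNil (pvRow table m) tc wpt hok hf'
      rw [PySem.List.pyRange_one_cons hmn]
      simp only [List.findSome?_cons]
      rw [hnone, hslots, hfil]
      simp only [Option.map_none, List.map_nil, List.nil_append]
      exact pvRowsEq table tc wpt si (m + 1) htc
        (by have h : (m + 1) * tc = m * tc + tc := by ring
            linarith)
        (fun i h1 h2 h3 => hch i (by omega) h2 (fun k hk1 hk2 => by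
          by_cases hkm : k = m
          · subst hkm; exact hf'
          · exact h3 k (by omega) hk2))
termination_by ((table.length : Int) - m).toNat
decreasing_by omega

-- the wrapped row table[-kk] is the real row table[len-kk]
theorem pvRow_wrap (table : List (List (List (String × Int)))) (kk : Nat)
    (h1 : 0 < kk) (h2 : kk ≤ table.length) :
    pvRow table (-(kk : Int)) = pvRow table ((table.length : Int) - (kk : Int)) := by
  unfold pvRow
  rw [PySem.List.pyGetD_neg_natCast table kk ([] : List (List (String × Int))) h1 h2]
  rw [PySem.List.pyGetD_eq_getElem table ([] : List (List (String × Int))) (by omega)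
    (by omega)]
  congr 1
  omega

-- the compact D_ condition (a free existing cell at flat index ≥ start_i + len*term_count)
-- says exactly that A's wrapped-around scan region contains a free cell
theorem pvD_iff (table : List (List (List (String × Int)))) (tc wpt si : Int)
    (htc : 1 ≤ tc) (hlo : -((table.length : Int) * tc) ≤ si) (hneg : si < 0) :
    (∃ p ∈ PySem.List.enumerate table, ∃ q ∈ PySem.List.enumerate p.2,
        si + (table.length : Int) * tc ≤ p.1 * tc + q.1 ∧ q.1 < tc ∧
        (q.2.length : Int) < wpt)
    ↔ (pvSegFree (pvRow table (PySem.Int.floordiv si tc)) tc wpt (PySem.Int.mod si tc) = true ∨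
       ∃ k ∈ PySem.List.pyRange (PySem.Int.floordiv si tc + 1) 0 1,
         pvSegFree (pvRow table k) tc wpt 0 = true) := by
  set n : Int := (table.length : Int) with hn
  set r : Int := PySem.Int.floordiv si tc with hr
  set c : Int := PySem.Int.mod si tc with hc
  have hc0 : 0 ≤ c := PySem.Int.mod_nonneg si (by omega)
  have hc1 : c < tc := PySem.Int.mod_lt si (by omega)
  have hsi : r * tc + c = si := PySem.Int.floordiv_mul_add_mod si tc
  have hn0 : (0 : Int) ≤ n := by rw [hn]; exact Int.natCast_nonneg _
  have hrneg : r ≤ -1 := by nlinarith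
  have hrlo : -n ≤ r := by nlinarith
  have hwrapEq : ∀ k : Int, -n ≤ k → k < 0 → pvRow table k = pvRow table (k + n) := by
    intro k h1 h2
    have hw := pvRow_wrap table (-k).toNat (by omega) (by omega)
    have e1 : -(((-k).toNat : Nat) : Int) = k := by omega
    have e2 : (table.length : Int) - (((-k).toNat : Nat) : Int) = k + n := by omega
    rw [e1, e2] at hw
    exact hw
  rw [PySem.List.enumerate_eq_map_pyRange (xs := table) (d := ([] : List (List (String × Int))))]
  constructor
  · rintro ⟨p, hp, q, hq, hge, hqtc, hfree⟩
    simp only [List.mem_map, PySem.List.mem_pyRange_one, PySem.List.len_eq] at hp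
    obtain ⟨i, ⟨hi0, hin⟩, rfl⟩ := hp
    rw [PySem.List.enumerate_eq_map_pyRange (d := ([] : List (String × Int)))] at hq
    simp only [List.mem_map, PySem.List.mem_pyRange_one, PySem.List.len_eq] at hq
    obtain ⟨j, ⟨hj0, hjlen⟩, rfl⟩ := hq
    have hjlen' : j < ((pvRow table i).length : Int) := hjlen
    have hfree' : pvCellLen (pvRow table i) j < wpt := hfree
    have hge' : si + n * tc ≤ i * tc + j := hge
    have hqtc' : j < tc := hqtc
    have hkrow : pvRow table (i - n) = pvRow table i := by
      rw [hwrapEq (i - n) (by omega) (by omega), show i - n + n = i by ring]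
    have hk : r ≤ i - n := by
      by_contra hcon
      have h1 : (i - n) * tc ≤ (r - 1) * tc :=
        mul_le_mul_of_nonneg_right (by omega) (by omega)
      have h2 : (r - 1) * tc = r * tc - tc := by ring
      have h3 : (i - n) * tc = i * tc - n * tc := by ring
      linarith
    by_cases hkeq : i - n = r
    · left
      apply (pvSegFree_iff _ tc wpt c hc0).mpr
      refine ⟨j, ?_, ?_, ?_⟩
      · have hieq : i = r + n := by omega
        have h1 : (r + n) * tc = r * tc + n * tc := by ring
        rw [hieq] at hge'
        linarith
      · rw [← hkeq, hkrow]
        omega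
      · rw [← hkeq, hkrow]
        exact hfree'
    · right
      refine ⟨i - n, PySem.List.mem_pyRange_one.mpr ⟨by omega, by omega⟩, ?_⟩
      apply (pvSegFree_iff _ tc wpt 0 le_rfl).mpr
      exact ⟨j, hj0, by rw [hkrow]; omega, by rw [hkrow]; exact hfree'⟩
  · rintro (hb | ⟨k, hk, hb⟩)
    · obtain ⟨j, hja, hjm, hp⟩ := (pvSegFree_iff _ tc wpt c hc0).mp hb
      have hkrow := hwrapEq r hrlo (by omega)
      refine ⟨(r + n, pvRow table (r + n)), ?_,
        (j, PySem.List.pyGetD (pvRow table (r + n)) j []), ?_, ?_, by omega, ?_⟩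
      · simp only [List.mem_map, PySem.List.mem_pyRange_one, PySem.List.len_eq]
        exact ⟨r + n, ⟨by omega, by omega⟩, rfl⟩
      · rw [PySem.List.enumerate_eq_map_pyRange (d := ([] : List (String × Int)))]
        simp only [List.mem_map, PySem.List.mem_pyRange_one, PySem.List.len_eq]
        exact ⟨j, ⟨by omega, by rw [← hkrow]; omega⟩, rfl⟩
      · have h1 : (r + n) * tc = r * tc + n * tc := by ring
        show si + n * tc ≤ (r + n) * tc + j
        linarith
      · show pvCellLen (pvRow table (r + n)) j < wpt
        rw [← hkrow]
        exact hp
    · obtain ⟨hk1, hk2⟩ := PySem.List.mem_pyRange_one.mp hk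
      obtain ⟨j, hj0, hjm, hp⟩ := (pvSegFree_iff _ tc wpt 0 le_rfl).mp hb
      have hkrow := hwrapEq k (by omega) hk2
      refine ⟨(k + n, pvRow table (k + n)), ?_,
        (j, PySem.List.pyGetD (pvRow table (k + n)) j []), ?_, ?_, by omega, ?_⟩
      · simp only [List.mem_map, PySem.List.mem_pyRange_one, PySem.List.len_eq]
        exact ⟨k + n, ⟨by omega, by omega⟩, rfl⟩
      · rw [PySem.List.enumerate_eq_map_pyRange (d := ([] : List (String × Int)))]
        simp only [List.mem_map, PySem.List.mem_pyRange_one, PySem.List.len_eq]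
        exact ⟨j, ⟨by omega, by rw [← hkrow]; omega⟩, rfl⟩
      · have h1 : (k + n) * tc = k * tc + n * tc := by ring
        have h2 : (r + 1) * tc ≤ k * tc := mul_le_mul_of_nonneg_right hk1 (by omega)
        have h3 : (r + 1) * tc = r * tc + tc := by ring
        show si + n * tc ≤ (k + n) * tc + j
        linarith
      · show pvCellLen (pvRow table (k + n)) j < wpt
        rw [← hkrow]
        exact hp

-- ===== VERDICT (by name: the statements are the Claim_ definitions above) =====
theorem find_table_idx_to_assign_spec : Claim_unchanged_find_table_idx_to_assign := by
  intro table tc wpt si hDom hPre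
  unfold Spec_find_table_idx_to_assign
  intro hD
  unfold D_find_table_idx_to_assign at hD
  unfold find_table_idx_to_assign
  simp only [pvScan_eq]
  rw [pvAlt_eq]
  rcases hPre with htc | ⟨htc, hlo, hhi, hok0, hch⟩
  · -- term_count ≤ -1 : every range on both sides is empty, both programs return -1
    have hcm : tc ≤ PySem.Int.mod si tc := le_of_lt (PySem.Int.mod_neg_bounds si (by omega)).1
    rw [PySem.List.pyRange_one_eq_nil hcm,
        PySem.List.pyRange_one_eq_nil (show tc ≤ (0 : Int) by omega)]
    have hB : pvSlots table tc wpt 0 = [] := by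
      unfold pvSlots
      apply List.flatMap_eq_nil_iff.mpr
      intro i _
      rw [PySem.List.pyRange_one_eq_nil
        (show min tc ((pvRow table i).length : Int) ≤ (0 : Int) by omega)]
      rfl
    rw [hB]
    simp only [List.find?_nil, Option.map_none]
    have hfs : (PySem.List.pyRange (PySem.Int.floordiv si tc + 1) (table.length : Int) 1).findSome?
        (fun _ : Int => (none : Option Int)) = none :=
      List.findSome?_eq_none_iff.mpr (fun _ _ => rfl)
    rw [hfs]
  · set n : Int := (table.length : Int) with hn
    set r : Int := PySem.Int.floordiv si tc with hr
    set c : Int := PySem.Int.mod si tc with hc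
    have hc0 : 0 ≤ c := PySem.Int.mod_nonneg si (by omega)
    have hc1 : c < tc := PySem.Int.mod_lt si (by omega)
    have hsi : r * tc + c = si := PySem.Int.floordiv_mul_add_mod si tc
    have hn0 : (0 : Int) ≤ n := by rw [hn]; exact Int.natCast_nonneg _
    have hrtc : (r + 1) * tc = r * tc + tc := by ring
    have hrn : r < n := by nlinarith [hsi, hc0, hhi, htc]
    by_cases hsi0 : 0 ≤ si
    · -- nonnegative start: split B's candidates at row r
      have hr0 : 0 ≤ r := by nlinarith [hsi, hc1, htc, hsi0]
      have hseg := pvSegEq (pvRow table r) tc wpt c htc hc0 hc1 hok0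
      rw [pvSlots_split table tc wpt 0 r hr0 (by omega), List.find?_append]
      have hpre : ((PySem.List.pyRange 0 r 1).flatMap (fun i =>
          ((PySem.List.pyRange 0 (min tc ((pvRow table i).length : Int)) 1).filter
              (fun j => decide (pvCellLen (pvRow table i) j < wpt))).map
            (fun j => i * tc + j))).find? (fun idx => decide (si ≤ idx)) = none := by
        apply List.find?_eq_none.mpr
        intro x hx
        simp only [List.mem_flatMap, List.mem_map, List.mem_filter,
          PySem.List.mem_pyRange_one] at hx
        obtain ⟨i, ⟨hi0, hir⟩, j, ⟨⟨hj0, hjm⟩, _⟩, rfl⟩ := hx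
        simp only [decide_eq_true_eq]
        have h1 : i * tc ≤ (r - 1) * tc :=
          mul_le_mul_of_nonneg_right (by omega) (by omega)
        have h2 : (r - 1) * tc = r * tc - tc := by ring
        have hjtc : j < tc := by omega
        intro hcon
        linarith
      rw [hpre, Option.none_or]
      rw [pvSlots_split table tc wpt r (r + 1) (by omega) (by omega),
          PySem.List.pyRange_one_singleton, List.flatMap_cons, List.flatMap_nil,
          List.append_nil, List.find?_append, List.find?_map]
      have hcomp : ((fun idx => decide (si ≤ idx)) ∘ (fun j : Int => r * tc + j))
          = (fun j : Int => decide (c ≤ j)) := by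
        funext j
        simp only [Function.comp]
        exact decide_eq_decide.mpr ⟨fun h => by linarith, fun h => by linarith⟩
      rw [hcomp, ← hseg]
      cases hA : (PySem.List.pyRange c tc 1).find?
          (fun j => decide (pvCellLen (pvRow table r) j < wpt)) with
      | some j => simp
      | none =>
        simp only [Option.map_none, Option.none_or]
        have hfr : pvSegFree (pvRow table r) tc wpt c = false := by
          cases hb : pvSegFree (pvRow table r) tc wpt c
          · rfl
          · obtain ⟨j, hja, hjm, hp⟩ := (pvSegFree_iff _ tc wpt c hc0).mp hb
            have hsome : ((PySem.List.pyRange c tc 1).find?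
                (fun j => decide (pvCellLen (pvRow table r) j < wpt))).isSome :=
              List.find?_isSome.mpr
                ⟨j, PySem.List.mem_pyRange_one.mpr ⟨hja, by omega⟩, by simpa using hp⟩
            rw [hA] at hsome; simp at hsome
        rw [pvRowsEq table tc wpt si (r + 1) htc (by linarith)
          (fun i h1 h2 h3 => hch i (PySem.List.mem_pyRange_one.mpr ⟨h1, h2⟩)
            ⟨hfr, fun k hk => h3 k (PySem.List.mem_pyRange_one.mp hk).1
              (PySem.List.mem_pyRange_one.mp hk).2⟩)]
    · -- negative start outside D_: the wrapped scan region is full-width and not free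
      replace hsi0 : si < 0 := by omega
      have hrneg : r ≤ -1 := by nlinarith [hsi, hc0, htc, hsi0]
      have hDiff := pvD_iff table tc wpt si htc hlo hsi0
      have hfr : pvSegFree (pvRow table r) tc wpt c = false := by
        cases hb : pvSegFree (pvRow table r) tc wpt c
        · rfl
        · exact absurd ⟨htc, hlo, hsi0, hDiff.mpr (Or.inl hb)⟩ hD
      have hwrap : ∀ k : Int, r + 1 ≤ k → k < 0 →
          pvSegFree (pvRow table k) tc wpt 0 = false := by
        intro k hk1 hk2
        cases hb : pvSegFree (pvRow table k) tc wpt 0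
        · rfl
        · exact absurd ⟨htc, hlo, hsi0, hDiff.mpr
            (Or.inr ⟨k, PySem.List.mem_pyRange_one.mpr ⟨hk1, hk2⟩, hb⟩)⟩ hD
      rw [pvSegNone (pvRow table r) tc wpt c hc0 hok0 hfr]
      rw [PySem.List.pyRange_one_append (r + 1) 0 n (by omega) hn0, List.findSome?_append]
      have hwnone : ((PySem.List.pyRange (r + 1) 0 1).findSome? (fun i =>
          ((PySem.List.pyRange 0 tc 1).find?
              (fun j => decide (pvCellLen (pvRow table i) j < wpt))).map
            (fun j => i * tc + j))) = none := by
        apply List.findSome?_eq_none_iff.mpr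
        intro k hk
        obtain ⟨hk1, hk2⟩ := PySem.List.mem_pyRange_one.mp hk
        have hokk : pvSegOk (pvRow table k) tc wpt 0 = true :=
          hch k (PySem.List.mem_pyRange_one.mpr ⟨hk1, by omega⟩)
            ⟨hfr, fun k' hk' => hwrap k' (PySem.List.mem_pyRange_one.mp hk').1
              (by have := (PySem.List.mem_pyRange_one.mp hk').2; omega)⟩
        rw [pvSegNone (pvRow table k) tc wpt 0 le_rfl hokk (hwrap k hk1 hk2)]
        rfl
      rw [hwnone, Option.none_or]
      rw [pvRowsEq table tc wpt si 0 htc (by rw [zero_mul]; omega)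
        (fun i h1 h2 h3 => hch i (PySem.List.mem_pyRange_one.mpr ⟨by omega, h2⟩)
          ⟨hfr, fun k hk => by
            obtain ⟨hka, hkb⟩ := PySem.List.mem_pyRange_one.mp hk
            by_cases hkneg : k < 0
            · exact hwrap k hka hkneg
            · exact h3 k (by omega) hkb⟩)]

theorem find_table_idx_to_assign_changed : Claim_changed_find_table_idx_to_assign := by
  unfold Claim_changed_find_table_idx_to_assign; decide

theorem find_table_idx_to_assign_tight : Claim_exact_find_table_idx_to_assign := by
  intro table tc wpt si hDom hPre hD
  unfold D_find_table_idx_to_assign at hD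
  obtain ⟨htc, hlo, hneg, hfree⟩ := hD
  replace hfree := (pvD_iff table tc wpt si htc hlo hneg).mp hfree
  rcases hPre with h | ⟨_, _, hhi, hok0, hch⟩
  · omega
  unfold find_table_idx_to_assign
  simp only [pvScan_eq]
  rw [pvAlt_eq]
  set n : Int := (table.length : Int) with hn
  set r : Int := PySem.Int.floordiv si tc with hr
  set c : Int := PySem.Int.mod si tc with hc
  have hc0 : 0 ≤ c := PySem.Int.mod_nonneg si (by omega)
  have hc1 : c < tc := PySem.Int.mod_lt si (by omega)
  have hsi : r * tc + c = si := PySem.Int.floordiv_mul_add_mod si tc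
  have hn0 : (0 : Int) ≤ n := by rw [hn]; exact Int.natCast_nonneg _
  have hrneg : r ≤ -1 := by nlinarith [hsi, hc0, htc, hneg]
  have hrlo : -n ≤ r := by nlinarith [hsi, hc1, htc, hlo]
  -- B returns a nonnegative index: the wrapped free cell is a real free cell
  obtain ⟨k, a, hkr, hkneg, ha0, hsf⟩ :
      ∃ k a : Int, r ≤ k ∧ k < 0 ∧ 0 ≤ a ∧ pvSegFree (pvRow table k) tc wpt a = true := by
    rcases hfree with h | ⟨k, hk, h⟩
    · exact ⟨r, c, le_rfl, by omega, hc0, h⟩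
    · obtain ⟨hk1, hk2⟩ := PySem.List.mem_pyRange_one.mp hk
      exact ⟨k, 0, by omega, hk2, le_rfl, h⟩
  obtain ⟨j, hja, hjm, hp⟩ := (pvSegFree_iff _ tc wpt a ha0).mp hsf
  have hwrapEq : pvRow table k = pvRow table (k + n) := by
    have hw := pvRow_wrap table (-k).toNat (by omega) (by omega)
    have e1 : -(((-k).toNat : Nat) : Int) = k := by omega
    have e2 : (table.length : Int) - (((-k).toNat : Nat) : Int) = k + n := by omega
    rw [e1, e2] at hw
    exact hw
  have hmem : (k + n) * tc + j ∈ pvSlots table tc wpt 0 := by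
    rw [pvMem_slots]
    exact ⟨k + n, j, by omega, by omega, by omega,
      by rw [← hwrapEq]; exact hjm, by rw [← hwrapEq]; exact hp, rfl⟩
  have hBsome : ((pvSlots table tc wpt 0).find? (fun idx => decide (si ≤ idx))).isSome := by
    apply List.find?_isSome.mpr
    refine ⟨(k + n) * tc + j, hmem, ?_⟩
    simp only [decide_eq_true_eq]
    nlinarith [mul_nonneg (show (0 : Int) ≤ k + n by omega) (show (0 : Int) ≤ tc by omega)]
  obtain ⟨b, hb⟩ := Option.isSome_iff_exists.mp hBsome
  have hb0 : 0 ≤ b := by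
    obtain ⟨i, j', hi0, hin, hj0, _, _, rfl⟩ :=
      (pvMem_slots table tc wpt 0 b).mp (List.mem_of_find?_eq_some hb)
    nlinarith [mul_nonneg (show (0 : Int) ≤ i from hi0) (show (0 : Int) ≤ tc by omega)]
  rw [hb]
  -- A returns a negative index: the first free cell it meets lies in the wrapped region
  cases hA : (PySem.List.pyRange c tc 1).find?
      (fun j => decide (pvCellLen (pvRow table r) j < wpt)) with
  | some j1 =>
    have hj1 := PySem.List.mem_pyRange_one.mp (List.mem_of_find?_eq_some hA)
    have hneg1 : r * tc + j1 ≤ -1 := by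
      have h1 : r * tc ≤ (-1) * tc := mul_le_mul_of_nonneg_right hrneg (by omega)
      have h2 : (-1 : Int) * tc = -tc := by ring
      linarith [hj1.2]
    show r * tc + j1 ≠ b
    exact ne_of_lt (by linarith)
  | none =>
    rcases hfree with hcontr | ⟨k2, hk2mem, hsf2⟩
    · exfalso
      obtain ⟨j2, hj2a, hj2m, hp2⟩ := (pvSegFree_iff _ tc wpt c hc0).mp hcontr
      have hsome : ((PySem.List.pyRange c tc 1).find?
          (fun j => decide (pvCellLen (pvRow table r) j < wpt))).isSome :=
        List.find?_isSome.mpr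
          ⟨j2, PySem.List.mem_pyRange_one.mpr ⟨hj2a, by omega⟩, by simpa using hp2⟩
      rw [hA] at hsome; simp at hsome
    · obtain ⟨hk21, hk22⟩ := PySem.List.mem_pyRange_one.mp hk2mem
      rw [PySem.List.pyRange_one_append (r + 1) 0 n (by omega) hn0, List.findSome?_append]
      cases hw : ((PySem.List.pyRange (r + 1) 0 1).findSome? (fun i =>
          ((PySem.List.pyRange 0 tc 1).find?
              (fun j => decide (pvCellLen (pvRow table i) j < wpt))).map
            (fun j => i * tc + j))) with
      | none =>
        exfalso
        have hall := List.findSome?_eq_none_iff.mp hw k2 hk2mem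
        obtain ⟨j2, hj2a, hj2m, hp2⟩ := (pvSegFree_iff _ tc wpt 0 le_rfl).mp hsf2
        have hsome2 : ((PySem.List.pyRange 0 tc 1).find?
            (fun j => decide (pvCellLen (pvRow table k2) j < wpt))).isSome :=
          List.find?_isSome.mpr
            ⟨j2, PySem.List.mem_pyRange_one.mpr ⟨hj2a, by omega⟩, by simpa using hp2⟩
        obtain ⟨v2, hv2⟩ := Option.isSome_iff_exists.mp hsome2
        rw [hv2] at hall; simp at hall
      | some v =>
        obtain ⟨x, hxmem, hxv⟩ := List.exists_of_findSome?_eq_some hw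
        obtain ⟨hx1, hx2⟩ := PySem.List.mem_pyRange_one.mp hxmem
        obtain ⟨j3, hj3, rfl⟩ := Option.map_eq_some_iff.mp hxv
        have hj3tc := (PySem.List.mem_pyRange_one.mp (List.mem_of_find?_eq_some hj3)).2
        have hneg3 : x * tc + j3 ≤ -1 := by
          have h1 : x * tc ≤ (-1) * tc := mul_le_mul_of_nonneg_right (by omega) (by omega)
          have h2 : (-1 : Int) * tc = -tc := by ring
          linarith
        simp only [Option.some_or]
        show x * tc + j3 ≠ b
        exact ne_of_lt (by linarith)
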